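-- pv_equiv track=rewrite | github.com/Nattanun16/Lab | lab 8/non_divide_and_conpuer.py | iterative_sequence
-- ===== SOURCE A (Python) =====
-- def iterative_sequence(m, n): # สร้างลำดับจาก m..n แบบ iterative
--     """
--     สร้างลำดับจาก m..n แบบ iterative ให้ผลเหมือนโจทย์
--     (โครงสร้าง: ขยายจากลำดับ 0..(n-m) ด้วย evens ก่อน แล้ว odds)
--     """
--     if n < m: # Base case เมื่อช่วงไม่ถูกต้อง
--         return [] # คืนลำดับว่าง
--     length = n - m  # ทำงานบนช่วง 0..length แล้วเลื่อน +m ท้ายสุด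
--
--     # สร้างลำดับสำหรับช่วง 0..length
--     seq = [0] # เริ่มต้นด้วยลำดับที่มีแค่ 0
--     while len(seq) < length + 1: # ทำจนกว่าลำดับจะมีขนาด (length+1)
--         temp = [] # ชั่วคราวเก็บลำดับใหม่
--         # เอาเลขคู่ (x*2) ก่อน
--         for x in seq: # วนในลำดับเดิม
--             v = x * 2 # สร้างเลขคู่
--             if v <= length: # ถ้าไม่เกิน length
--                 temp.append(v) # เก็บเลขคู่
--         # แล้วเอาเลขคี่ (x*2+1)
--         for x in seq: # วนในลำดับเดิม
--             v = x * 2 + 1 # สร้างเลขคี่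
--             if v <= length: # ถ้าไม่เกิน length
--                 temp.append(v) # เก็บเลขคี่
--         seq = temp # อัพเดตลำดับเป็นลำดับใหม่
--
--     # เลื่อนค่าทั้งหมดเป็นช่วง m..n
--     return [x + m for x in seq]
-- ===== SOURCE B (Python) =====
-- def iterative_sequence(m, n):
--     """Divide-and-conquer: build the 0..L sequence recursively (evens half, odds half), then shift by m."""
--     if n < m:
--         return []
--
--     def S(L):
--         if L < 0:
--             return []
--         if L == 0:
--             return [0]
--         return [2 * x for x in S(L // 2)] + [2 * x + 1 for x in S((L - 1) // 2)]
--
--     return [x + m for x in S(n - m)]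
-- ===== Notes on version B (the rewrite author's own statement) =====
-- stated objective: alternative
-- what changed: Replaced A's iterative synchronous-doubling passes (repeatedly rebuilding the whole sequence from [0] until it reaches full size) with a divide-and-conquer recursion S(L) = evens from S(L//2) ++ odds from S((L-1)//2) that builds the sequence in one recursive descent.
import Mathlib
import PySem

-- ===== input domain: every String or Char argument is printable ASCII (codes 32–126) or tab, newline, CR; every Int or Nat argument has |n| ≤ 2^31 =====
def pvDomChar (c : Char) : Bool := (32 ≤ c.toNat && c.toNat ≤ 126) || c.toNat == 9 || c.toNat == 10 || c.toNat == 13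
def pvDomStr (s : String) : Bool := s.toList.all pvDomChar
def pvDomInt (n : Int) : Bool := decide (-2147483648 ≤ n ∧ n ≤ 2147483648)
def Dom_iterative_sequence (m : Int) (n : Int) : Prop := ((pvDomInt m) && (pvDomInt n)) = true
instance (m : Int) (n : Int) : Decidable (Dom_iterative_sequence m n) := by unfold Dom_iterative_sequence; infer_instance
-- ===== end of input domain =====

-- B replaces A's iterative doubling passes by a divide-and-conquer recursion (alternative decomposition, same result).

-- ===== PORT A =====
-- one iteration of the while-loop body: temp collects evens (x*2 <= length) then odds (x*2+1 <= length)
def pvStepA (length : Int) (seq : List Int) : List Int :=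
  let temp := seq.foldl (fun acc x => if x * 2 ≤ length then acc ++ [x * 2] else acc) []
  seq.foldl (fun acc x => if x * 2 + 1 ≤ length then acc ++ [x * 2 + 1] else acc) temp

-- the while-loop; the fuel (length.toNat + 1) only bounds the number of iterations, which is
-- at most log2(length)+1 since the sequence at least doubles until it reaches full size
def pvLoopA (length : Int) : Nat → List Int → List Int
  | 0, seq => seq
  | fuel + 1, seq =>
      if (seq.length : Int) < length + 1 then pvLoopA length fuel (pvStepA length seq) else seq

def iterative_sequence (m : Int) (n : Int) : List Int :=
  if n < m then []
  else
    let length := n - m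
    (pvLoopA length (length.toNat + 1) [0]).map (fun x => x + m)

-- ===== PORT B =====
-- S(L): [] for L<0, [0] for L=0, else evens from S(L//2) then odds from S((L-1)//2)
def pvS (L : Int) : List Int :=
  if L < 0 then []
  else if L = 0 then [0]
  else (pvS (PySem.Int.floordiv L 2)).map (fun x => 2 * x)
       ++ (pvS (PySem.Int.floordiv (L - 1) 2)).map (fun x => 2 * x + 1)
termination_by L.toNat
decreasing_by
  · rw [PySem.Int.floordiv_eq_ediv_of_pos (by omega : (0:Int) < 2)]; omega
  · rw [PySem.Int.floordiv_eq_ediv_of_pos (by omega : (0:Int) < 2)]; omega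

def iterative_sequence_alt (m : Int) (n : Int) : List Int :=
  if n < m then []
  else (pvS (n - m)).map (fun x => x + m)

-- ===== PRECONDITION & SPEC =====
def Spec_iterative_sequence (m : Int) (n : Int) (out : List Int) : Prop := out = iterative_sequence_alt m n
instance (m : Int) (n : Int) (out : List Int) : Decidable (Spec_iterative_sequence m n out) := by unfold Spec_iterative_sequence; infer_instance

-- ===== CLAIM (what is proved, stated in full; the proofs are below) =====
def Claim_equal_iterative_sequence : Prop := ∀ (m : Int) (n : Int), Dom_iterative_sequence m n → Spec_iterative_sequence m n (iterative_sequence m n)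

-- ===== LEMMAS AND PROOFS =====

lemma pvS_neg {L : Int} (h : L < 0) : pvS L = [] := by rw [pvS]; simp [h]

lemma pvS_zero : pvS 0 = [0] := by rw [pvS]; simp

lemma pvS_pos {L : Int} (h : 1 ≤ L) :
    pvS L = (pvS (L / 2)).map (fun x => 2 * x) ++ (pvS ((L - 1) / 2)).map (fun x => 2 * x + 1) := by
  rw [pvS, PySem.Int.floordiv_eq_ediv_of_pos (by omega : (0:Int) < 2),
     PySem.Int.floordiv_eq_ediv_of_pos (by omega : (0:Int) < 2)]
  simp [show ¬ L < 0 by omega, show ¬ L = 0 by omega]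

lemma pvS_length_aux : ∀ (k : Nat) (L : Int), L.toNat = k → 0 ≤ L → (pvS L).length = L.toNat + 1 := by
  intro k
  induction k using Nat.strong_induction_on with
  | _ k ih =>
    intro L hk hL
    rcases lt_or_ge L 1 with h1 | h1
    · have : L = 0 := by omega
      subst this; simp [pvS_zero]
    · rw [pvS_pos h1]
      rw [List.length_append, List.length_map, List.length_map,
        ih (L / 2).toNat (by omega) (L / 2) rfl (by omega),
        ih ((L - 1) / 2).toNat (by omega) ((L - 1) / 2) rfl (by omega)]
      omega

lemma pvS_length {L : Int} (hL : 0 ≤ L) : (pvS L).length = L.toNat + 1 :=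
  pvS_length_aux L.toNat L rfl hL

lemma pvS_filter_aux : ∀ (k : Nat) (L : Int), L.toNat = k → 0 ≤ L → ∀ (t : Int),
    (pvS L).filter (fun x => decide (x ≤ t)) = pvS (min t L) := by
  intro k
  induction k using Nat.strong_induction_on with
  | _ k ih =>
    intro L hk hL t
    rcases lt_or_ge L 1 with h1 | h1
    · have : L = 0 := by omega
      subst this
      rcases lt_or_ge t 0 with ht | ht
      · simp [pvS_zero, pvS_neg (show min t 0 < 0 by omega), show ¬ (0:Int) ≤ t by omega]
      · rw [show min t (0:Int) = 0 by omega]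
        simp [pvS_zero, ht]
    · rw [pvS_pos h1, List.filter_append, List.filter_map, List.filter_map]
      have he : ((fun x => decide (x ≤ t)) ∘ (fun x : Int => 2 * x)) = fun x : Int => decide (x ≤ t / 2) := by
        funext x; simp only [Function.comp_apply, decide_eq_decide]; omega
      have ho : ((fun x => decide (x ≤ t)) ∘ (fun x : Int => 2 * x + 1)) = fun x : Int => decide (x ≤ (t - 1) / 2) := by
        funext x; simp only [Function.comp_apply, decide_eq_decide]; omega
      rw [he, ho, ih (L / 2).toNat (by omega) (L / 2) rfl (by omega) (t / 2),
        ih ((L - 1) / 2).toNat (by omega) ((L - 1) / 2) rfl (by omega) ((t - 1) / 2)]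
      rcases lt_or_ge t 0 with ht | ht
      · rw [pvS_neg (show min (t / 2) (L / 2) < 0 by omega),
          pvS_neg (show min ((t - 1) / 2) ((L - 1) / 2) < 0 by omega),
          pvS_neg (show min t L < 0 by omega)]
        simp
      · rcases lt_or_ge t 1 with ht1 | ht1
        · have h0 : t = 0 := by omega
          subst h0
          rw [show min ((0:Int) / 2) (L / 2) = 0 by omega, pvS_zero,
            pvS_neg (show min (((0:Int) - 1) / 2) ((L - 1) / 2) < 0 by omega),
            show min (0:Int) L = 0 by omega, pvS_zero]
          simp
        · have hM : 1 ≤ min t L := by omega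
          rw [pvS_pos hM, show min t L / 2 = min (t / 2) (L / 2) by omega,
            show (min t L - 1) / 2 = min ((t - 1) / 2) ((L - 1) / 2) by omega]

lemma pvS_filter {L : Int} (hL : 0 ≤ L) (t : Int) :
    (pvS L).filter (fun x => decide (x ≤ t)) = pvS (min t L) :=
  pvS_filter_aux L.toNat L rfl hL t

lemma pvStepA_pvS {L j : Int} (hj : 0 ≤ j) :
    pvStepA L (pvS j) = pvS (min (2 * j + 1) L) := by
  unfold pvStepA
  rw [PySem.List.foldl_append_ite (fun x : Int => x * 2 ≤ L) (fun x => x * 2),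
    PySem.List.foldl_append_ite (fun x : Int => x * 2 + 1 ≤ L) (fun x => x * 2 + 1)]
  simp only [List.nil_append]
  have he : (fun x : Int => decide (x * 2 ≤ L)) = fun x : Int => decide (x ≤ L / 2) := by
    funext x; simp only [decide_eq_decide]; omega
  have ho : (fun x : Int => decide (x * 2 + 1 ≤ L)) = fun x : Int => decide (x ≤ (L - 1) / 2) := by
    funext x; simp only [decide_eq_decide]; omega
  rw [he, ho, pvS_filter hj, pvS_filter hj]
  rcases lt_or_ge L 0 with hL | hL
  · rw [pvS_neg (show min (L / 2) j < 0 by omega),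
      pvS_neg (show min ((L - 1) / 2) j < 0 by omega),
      pvS_neg (show min (2 * j + 1) L < 0 by omega)]
    simp
  · rcases lt_or_ge L 1 with hL1 | hL1
    · have h0 : L = 0 := by omega
      subst h0
      rw [show min ((0:Int) / 2) j = 0 by omega, pvS_zero,
        pvS_neg (show min (((0:Int) - 1) / 2) j < 0 by omega),
        show min (2 * j + 1) (0:Int) = 0 by omega, pvS_zero]
      simp only [List.map_cons, List.map_nil, List.append_nil]
      norm_num
    · have hM : 1 ≤ min (2 * j + 1) L := by omega
      rw [pvS_pos hM, show min (2 * j + 1) L / 2 = min (L / 2) j by omega,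
        show (min (2 * j + 1) L - 1) / 2 = min ((L - 1) / 2) j by omega]
      congr 1
      · apply List.map_congr_left; intro x _; ring
      · apply List.map_congr_left; intro x _; ring

lemma pvLoopA_pvS : ∀ (fuel : Nat) (L j : Int), 0 ≤ j → j ≤ L → L.toNat - j.toNat ≤ fuel →
    pvLoopA L fuel (pvS j) = pvS L := by
  intro fuel
  induction fuel with
  | zero =>
    intro L j hj hjL hf
    have : j = L := by omega
    subst this; rfl
  | succ f ih =>
    intro L j hj hjL hf
    rw [pvLoopA, pvS_length hj]
    by_cases h : ((j.toNat + 1 : Nat) : Int) < L + 1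
    · rw [if_pos h, pvStepA_pvS hj]
      exact ih L (min (2 * j + 1) L) (by omega) (by omega) (by omega)
    · have : j = L := by omega
      subst this
      rw [if_neg h]

-- ===== VERDICT (by name: the statement is the Claim_ definition above) =====
theorem iterative_sequence_spec : Claim_equal_iterative_sequence := by
  intro m n _
  unfold Spec_iterative_sequence iterative_sequence iterative_sequence_alt
  by_cases h : n < m
  · simp [h]
  · rw [if_neg h, if_neg h]
    have h0 : (0:Int) ≤ n - m := by omega
    show List.map (fun x => x + m) (pvLoopA (n - m) ((n - m).toNat + 1) [0]) = _
    rw [show ([0] : List Int) = pvS 0 from pvS_zero.symm,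
      pvLoopA_pvS ((n - m).toNat + 1) (n - m) 0 le_rfl h0 (by omega)]
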